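-- pv_equiv track=rewrite | github.com/NitinOnlyCodes/main | ninjaAnsTriangle.py | ninjaAndTriangle
-- ===== SOURCE A (Python) =====
-- def ninjaAndTriangle(n):
--     # Write your code here.
--     low = 1
--     high = n
--     ans= 0
--     while low <= high:
--         mid = (low + high) // 2
--         required = mid * (mid + 1) // 2
--
--         if required <= n:
--             ans = mid
--             low = mid+1
--         else:
--             high = mid - 1
--
--     return ans
-- ===== SOURCE B (Python) =====
-- def ninjaAndTriangle(n):
--     # Linear scan: increment m while the next triangular number still fits.
--     m = 0
--     while (m + 1) * (m + 2) // 2 <= n: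
--         m += 1
--     return m
-- ===== Notes on version B (the rewrite author's own statement) =====
-- stated objective: simpler
-- what changed: Replaces the binary search over the candidate range with a direct linear scan that increments the counter while the next triangular number still fits in n.
import Mathlib
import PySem

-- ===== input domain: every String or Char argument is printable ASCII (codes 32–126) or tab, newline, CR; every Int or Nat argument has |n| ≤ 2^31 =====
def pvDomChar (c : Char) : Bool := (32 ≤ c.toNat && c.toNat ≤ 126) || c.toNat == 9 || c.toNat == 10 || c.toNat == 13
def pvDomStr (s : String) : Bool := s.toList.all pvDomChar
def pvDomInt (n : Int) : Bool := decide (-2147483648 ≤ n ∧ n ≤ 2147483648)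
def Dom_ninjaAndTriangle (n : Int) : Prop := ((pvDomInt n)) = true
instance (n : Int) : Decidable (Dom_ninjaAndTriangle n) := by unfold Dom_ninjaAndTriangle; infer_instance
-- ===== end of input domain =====

-- B replaces A's binary search with a simpler linear scan over m; not faster (O(sqrt n) vs O(log n)).
-- Both loops carry a Nat fuel solely to make them total; the proofs show the supplied fuel always suffices.

-- ===== PORT A =====
-- while low <= high: mid = (low+high)//2; required = mid*(mid+1)//2; ...
def ninjaAndTriangleLoop (fuel : Nat) (n low high ans : Int) : Int :=
  match fuel with
  | 0 => ans
  | fuel + 1 =>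
    if low ≤ high then
      let mid := PySem.Int.floordiv (low + high) 2
      let required := PySem.Int.floordiv (mid * (mid + 1)) 2
      if required ≤ n then ninjaAndTriangleLoop fuel n (mid + 1) high mid
      else ninjaAndTriangleLoop fuel n low (mid - 1) ans
    else ans

def ninjaAndTriangle (n : Int) : Int :=
  ninjaAndTriangleLoop (n.toNat + 1) n 1 n 0

-- ===== PORT B =====
-- while (m+1)*(m+2)//2 <= n: m += 1
def ninjaAndTriangleAltLoop (fuel : Nat) (n m : Int) : Int :=
  match fuel with
  | 0 => m
  | fuel + 1 =>
    if PySem.Int.floordiv ((m + 1) * (m + 2)) 2 ≤ n then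
      ninjaAndTriangleAltLoop fuel n (m + 1)
    else m

def ninjaAndTriangle_alt (n : Int) : Int :=
  ninjaAndTriangleAltLoop (n.toNat + 1) n 0

-- ===== PRECONDITION & SPEC =====
def Spec_ninjaAndTriangle (n : Int) (out : Int) : Prop := out = ninjaAndTriangle_alt n
instance (n : Int) (out : Int) : Decidable (Spec_ninjaAndTriangle n out) := by unfold Spec_ninjaAndTriangle; infer_instance

-- ===== CLAIM (what is proved, stated in full; the proofs are below) =====
def Claim_equal_ninjaAndTriangle : Prop := ∀ (n : Int), Dom_ninjaAndTriangle n → Spec_ninjaAndTriangle n (ninjaAndTriangle n)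

-- ===== LEMMAS AND PROOFS =====

-- "triangular(x) ≤ n" as both ports test it, with the floor division eliminated.
def triLE (n x : Int) : Prop := x * (x + 1) ≤ 2 * n + 1

lemma fdiv2_le_iff (a q : Int) : PySem.Int.floordiv a 2 ≤ q ↔ a ≤ 2 * q + 1 := by
  constructor
  · intro h
    have := (PySem.Int.floordiv_lt_iff_lt_mul (a := a) (q := q + 1) (by norm_num : (0:Int) < 2)).mp (by omega)
    omega
  · intro h
    have := (PySem.Int.floordiv_lt_iff_lt_mul (a := a) (q := q + 1) (by norm_num : (0:Int) < 2)).mpr (by omega)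
    omega

lemma triLE_iff (n x : Int) :
    PySem.Int.floordiv (x * (x + 1)) 2 ≤ n ↔ triLE n x := fdiv2_le_iff _ _

lemma triLE_mono {n x y : Int} (hx : 0 ≤ x) (hxy : x ≤ y) (h : triLE n y) : triLE n x := by
  unfold triLE at *
  nlinarith

lemma triLE_unique {n a b : Int} (ha0 : 0 ≤ a) (ha1 : triLE n a) (ha2 : ¬ triLE n (a + 1))
    (hb0 : 0 ≤ b) (hb1 : triLE n b) (hb2 : ¬ triLE n (b + 1)) : a = b := by
  by_contra hne
  rcases lt_or_gt_of_ne hne with h | h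
  · exact ha2 (triLE_mono (by omega) (by omega) hb1)
  · exact hb2 (triLE_mono (by omega) (by omega) ha1)

-- A's loop invariant: ans = low-1 ≥ 0, triangular(ans) fits, triangular(high+1) does not;
-- fuel exceeding the interval length always suffices.
lemma aLoop_spec (n : Int) : ∀ (fuel : Nat) (low high ans : Int),
    (high - low + 1).toNat < fuel →
    low ≤ high + 1 → ans = low - 1 → 0 ≤ ans → triLE n ans → ¬ triLE n (high + 1) →
    0 ≤ ninjaAndTriangleLoop fuel n low high ans ∧
    triLE n (ninjaAndTriangleLoop fuel n low high ans) ∧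
    ¬ triLE n (ninjaAndTriangleLoop fuel n low high ans + 1) := by
  intro fuel
  induction fuel with
  | zero => intro low high ans hf; omega
  | succ fuel ih =>
    intro low high ans hf hle hans hans0 hCans hChigh
    rw [ninjaAndTriangleLoop]
    by_cases h : low ≤ high
    · rw [if_pos h]
      have hb := PySem.Int.floordiv_two_mid_bounds h
      set mid := PySem.Int.floordiv (low + high) 2 with hmid
      by_cases hreq : PySem.Int.floordiv (mid * (mid + 1)) 2 ≤ n
      · rw [if_pos hreq]
        exact ih (mid + 1) high mid (by omega) (by omega) (by omega) (by omega)
          ((triLE_iff n mid).mp hreq) hChigh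
      · rw [if_neg hreq]
        have hCmid : ¬ triLE n mid := fun hc => hreq ((triLE_iff n mid).mpr hc)
        exact ih low (mid - 1) ans (by omega) (by omega) hans hans0 hCans
          (by simpa using hCmid)
    · rw [if_neg h]
      have hlh : low = high + 1 := by omega
      exact ⟨hans0, hCans, by rw [hans, hlh] at hCans ⊢; simpa [hlh] using hChigh⟩

-- B's loop invariant: triangular(m) fits; the scan stops at the first m whose successor does not;
-- fuel exceeding n - m always suffices.
lemma bLoop_spec (n : Int) : ∀ (fuel : Nat) (m : Int),
    (n - m).toNat < fuel → 0 ≤ m → triLE n m →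
    0 ≤ ninjaAndTriangleAltLoop fuel n m ∧
    triLE n (ninjaAndTriangleAltLoop fuel n m) ∧
    ¬ triLE n (ninjaAndTriangleAltLoop fuel n m + 1) := by
  intro fuel
  induction fuel with
  | zero => intro m hf; omega
  | succ fuel ih =>
    intro m hf hm0 hCm
    rw [ninjaAndTriangleAltLoop]
    by_cases h : PySem.Int.floordiv ((m + 1) * (m + 2)) 2 ≤ n
    · rw [if_pos h]
      have hnext : (m + 1) * (m + 2) ≤ 2 * n + 1 := (fdiv2_le_iff _ _).mp h
      have hmn : m + 1 ≤ n := by nlinarith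
      exact ih (m + 1) (by omega) (by omega) (by unfold triLE; nlinarith)
    · rw [if_neg h]
      refine ⟨hm0, hCm, fun hc => h ?_⟩
      apply (fdiv2_le_iff _ _).mpr
      unfold triLE at hc
      nlinarith

-- ===== VERDICT (by name: the statement is the Claim_ definition above) =====
theorem ninjaAndTriangle_spec : Claim_equal_ninjaAndTriangle := by
  intro n _
  unfold Spec_ninjaAndTriangle ninjaAndTriangle ninjaAndTriangle_alt
  by_cases hn : n ≤ 0
  · -- n ≤ 0: A's interval [1, n] is empty and B's first test fails; both return 0.
    have hfuel : n.toNat + 1 = 1 := by omega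
    rw [hfuel, ninjaAndTriangleLoop, ninjaAndTriangleAltLoop]
    have hA : ¬ ((1:Int) ≤ n) := by omega
    have hB : ¬ PySem.Int.floordiv ((0 + 1) * (0 + 2)) 2 ≤ n := by
      intro hc
      have := (fdiv2_le_iff ((0 + 1) * (0 + 2)) n).mp hc
      omega
    rw [if_neg hA, if_neg hB]
  · -- n ≥ 1: both results satisfy the unique characterization of the answer.
    have hC0 : triLE n 0 := by unfold triLE; omega
    have hCn1 : ¬ triLE n (n + 1) := by unfold triLE; nlinarith
    have hA := aLoop_spec n (n.toNat + 1) 1 n 0 (by omega) (by omega) (by omega) (by omega) hC0 hCn1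
    have hB := bLoop_spec n (n.toNat + 1) 0 (by omega) (by omega) hC0
    exact triLE_unique hA.1 hA.2.1 hA.2.2 hB.1 hB.2.1 hB.2.2
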